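-- pv_equiv track=rewrite | github.com/sh1fter6/dotfiles | .config/waybar/menus/audio/audio_menu.py | get_input_icon
-- ===== SOURCE A (Python) =====
-- def get_input_icon(desc, lower_desc):
--     """Determine icon based on keywords"""
--     if any(x in lower_desc for x in ["headset", "auriculares", "casco", "audífono"]):
--         return "󰋎" # Headset
--     elif any(x in lower_desc for x in ["buds", "pods", "air", "dots", "pequeños", "earphone"]):
--         return "󰋐" # Earbuds (Requires proper Nerd Font)
--     elif "internal" in lower_desc or "interno" in lower_desc:
--         return "" # Mic
--     return "" # Default Mic
-- ===== SOURCE B (Python) =====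
-- KEY_RANK = {
--     "headset": 0, "auriculares": 0, "casco": 0, "aud\u00edfono": 0,
--     "buds": 1, "pods": 1, "air": 1, "dots": 1, "peque\u00f1os": 1, "earphone": 1,
--     "internal": 2, "interno": 2,
-- }
-- ICONS = ["\U000F02CE", "\U000F02D0", "\uF130", "\uF130"]
--
-- def get_input_icon(desc, lower_desc):
--     """Pick icon by the best (lowest) rank among ALL matching keywords."""
--     matched = [rank for k, rank in KEY_RANK.items() if k in lower_desc]
--     best = min(matched) if matched else 3
--     return ICONS[best]
-- ===== Notes on version B (the rewrite author's own statement) =====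
-- stated objective: alternative
-- what changed: Instead of A's prioritized if/elif short-circuit chain, B scans a flat keyword-to-rank map, collects the ranks of ALL keywords found in the description, takes the minimum rank (3 if none), and indexes an icon array by it; priority is encoded numerically, not by control flow.
import Mathlib
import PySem

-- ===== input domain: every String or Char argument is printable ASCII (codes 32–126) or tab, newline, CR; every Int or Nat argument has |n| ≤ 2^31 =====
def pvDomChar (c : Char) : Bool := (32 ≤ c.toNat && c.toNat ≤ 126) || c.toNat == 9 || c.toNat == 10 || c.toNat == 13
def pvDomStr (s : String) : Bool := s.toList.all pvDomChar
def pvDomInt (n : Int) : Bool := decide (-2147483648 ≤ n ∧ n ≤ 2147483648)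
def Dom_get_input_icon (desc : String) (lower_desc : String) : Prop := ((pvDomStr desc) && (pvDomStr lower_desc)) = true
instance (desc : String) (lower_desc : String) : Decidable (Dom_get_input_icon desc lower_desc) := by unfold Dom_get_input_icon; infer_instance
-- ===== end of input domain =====

-- B replaces A's prioritized if/elif chain by min-rank aggregation: collect the ranks of all matching keywords from a flat keyword→rank map and index an icon array by the minimum (objective: alternative).

-- ===== PORT A =====
def get_input_icon (desc : String) (lower_desc : String) : String :=
  if ["headset", "auriculares", "casco", "audífono"].any (fun x => PySem.Str.isIn x lower_desc) then "󰋎"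
  else if ["buds", "pods", "air", "dots", "pequeños", "earphone"].any (fun x => PySem.Str.isIn x lower_desc) then "󰋐"
  else if PySem.Str.isIn "internal" lower_desc || PySem.Str.isIn "interno" lower_desc then ""
  else ""
-- ===== PORT B =====
def pvKeyRank : List (String × Nat) :=
  [("headset", 0), ("auriculares", 0), ("casco", 0), ("audífono", 0),
   ("buds", 1), ("pods", 1), ("air", 1), ("dots", 1), ("pequeños", 1), ("earphone", 1),
   ("internal", 2), ("interno", 2)]
def pvIcons : List String := ["󰋎", "󰋐", "", ""]
def get_input_icon_alt (desc : String) (lower_desc : String) : String :=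
  let matched := pvKeyRank.filterMap (fun kr => if PySem.Str.isIn kr.1 lower_desc then some kr.2 else none)
  let best : Nat := match matched with
    | [] => 3
    | x :: xs => xs.foldl min x
  pvIcons.getD best ""


-- ===== PRECONDITION & SPEC =====
def Spec_get_input_icon (desc : String) (lower_desc : String) (out : String) : Prop := out = get_input_icon_alt desc lower_desc
instance (desc : String) (lower_desc : String) (out : String) : Decidable (Spec_get_input_icon desc lower_desc out) := by unfold Spec_get_input_icon; infer_instance

-- ===== CLAIM (what is proved, stated in full; the proofs are below) =====
def Claim_equal_get_input_icon : Prop := ∀ (desc : String) (lower_desc : String), Dom_get_input_icon desc lower_desc → Spec_get_input_icon desc lower_desc (get_input_icon desc lower_desc)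

-- ===== LEMMAS AND PROOFS =====
lemma pv_foldl_min_le_init (xs : List Nat) (x : Nat) : xs.foldl min x ≤ x := by
  induction xs generalizing x with
  | nil => simp
  | cons z zs ih => exact le_trans (ih (min x z)) (Nat.min_le_left _ _)

lemma pv_foldl_min_mem (xs : List Nat) (x : Nat) : xs.foldl min x ∈ x :: xs := by
  induction xs generalizing x with
  | nil => simp
  | cons y ys ih =>
    simp only [List.foldl]
    rcases List.mem_cons.mp (ih (min x y)) with h | h
    · rw [h]
      rcases Nat.le_total x y with hxy | hxy
      · simp [Nat.min_eq_left hxy]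
      · simp [Nat.min_eq_right hxy]
    · simp [h]

lemma pv_foldl_min_le (xs : List Nat) (x y : Nat) (h : y ∈ x :: xs) : xs.foldl min x ≤ y := by
  induction xs generalizing x with
  | nil => simp_all
  | cons z zs ih =>
    simp only [List.foldl]
    rcases List.mem_cons.mp h with rfl | h1
    · exact le_trans (pv_foldl_min_le_init zs (min y z)) (Nat.min_le_left _ _)
    · rcases List.mem_cons.mp h1 with rfl | h2
      · exact le_trans (pv_foldl_min_le_init zs (min x y)) (Nat.min_le_right _ _)
      · exact ih (min x z) (List.mem_cons_of_mem _ h2)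

lemma pv_best_eq (x : Nat) (xs : List Nat) (v : Nat)
    (hmem : v ∈ x :: xs) (hlb : ∀ y ∈ x :: xs, v ≤ y) :
    xs.foldl min x = v :=
  le_antisymm (pv_foldl_min_le xs x v hmem) (hlb _ (pv_foldl_min_mem xs x))

-- ===== VERDICT (by name: the statement is the Claim_ definition above) =====
set_option maxHeartbeats 1000000 in
theorem get_input_icon_spec : Claim_equal_get_input_icon := by
  intro desc lower_desc _
  unfold Spec_get_input_icon get_input_icon get_input_icon_alt pvKeyRank pvIcons
  simp only [List.any_cons, List.any_nil, Bool.or_false]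
  set f := (fun kr : String × Nat => if PySem.Str.isIn kr.1 lower_desc then some kr.2 else none) with hf
  set L : List (String × Nat) := [("headset", 0), ("auriculares", 0), ("casco", 0), ("audífono", 0), ("buds", 1), ("pods", 1), ("air", 1), ("dots", 1), ("pequeños", 1), ("earphone", 1), ("internal", 2), ("interno", 2)] with hL
  split_ifs with h1 h2 h3
  -- case 1: headset group matched → best = 0
  · have h0 : (0:Nat) ∈ List.filterMap f L := by
      simp only [List.mem_filterMap, hf, hL]
      simp only [Bool.or_eq_true] at h1
      rcases h1 with h | h | h | h
      · exact ⟨("headset",0), by simp, by split <;> simp_all⟩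
      · exact ⟨("auriculares",0), by simp, by split <;> simp_all⟩
      · exact ⟨("casco",0), by simp, by split <;> simp_all⟩
      · exact ⟨("audífono",0), by simp, by split <;> simp_all⟩
    cases hm : List.filterMap f L with
    | nil => rw [hm] at h0; simp at h0
    | cons x xs =>
      rw [hm] at h0
      simp only [hm]
      rw [pv_best_eq x xs 0 h0 (fun y _ => Nat.zero_le y)]
      rfl
  -- case 2: earbud group matched, headset group not → best = 1
  · simp only [Bool.or_eq_true, not_or, Bool.not_eq_true] at h1
    obtain ⟨e1, e2, e3, e4⟩ := h1
    have h0 : (1:Nat) ∈ List.filterMap f L := by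
      simp only [List.mem_filterMap, hf, hL]
      simp only [Bool.or_eq_true] at h2
      rcases h2 with h | h | h | h | h | h
      · exact ⟨("buds",1), by simp, by split <;> simp_all⟩
      · exact ⟨("pods",1), by simp, by split <;> simp_all⟩
      · exact ⟨("air",1), by simp, by split <;> simp_all⟩
      · exact ⟨("dots",1), by simp, by split <;> simp_all⟩
      · exact ⟨("pequeños",1), by simp, by split <;> simp_all⟩
      · exact ⟨("earphone",1), by simp, by split <;> simp_all⟩
    have hlb : ∀ y ∈ List.filterMap f L, 1 ≤ y := by
      intro y hy
      simp only [List.mem_filterMap, hf, hL] at hy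
      obtain ⟨kr, hkr, hkr2⟩ := hy
      simp only [List.mem_cons, List.not_mem_nil, or_false] at hkr
      rcases hkr with rfl | rfl | rfl | rfl | rfl | rfl | rfl | rfl | rfl | rfl | rfl | rfl <;>
        (split at hkr2 <;> simp_all) <;> omega
    cases hm : List.filterMap f L with
    | nil => rw [hm] at h0; simp at h0
    | cons x xs =>
      rw [hm] at h0
      rw [hm] at hlb
      simp only [hm]
      rw [pv_best_eq x xs 1 h0 hlb]
      rfl
  -- case 3: internal matched, earlier groups not → best = 2
  · simp only [Bool.or_eq_true, not_or, Bool.not_eq_true] at h1 h2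
    obtain ⟨e1, e2, e3, e4⟩ := h1
    obtain ⟨e5, e6, e7, e8, e9, e10⟩ := h2
    have h0 : (2:Nat) ∈ List.filterMap f L := by
      simp only [List.mem_filterMap, hf, hL]
      simp only [Bool.or_eq_true] at h3
      rcases h3 with h | h
      · exact ⟨("internal",2), by simp, by split <;> simp_all⟩
      · exact ⟨("interno",2), by simp, by split <;> simp_all⟩
    have hlb : ∀ y ∈ List.filterMap f L, 2 ≤ y := by
      intro y hy
      simp only [List.mem_filterMap, hf, hL] at hy
      obtain ⟨kr, hkr, hkr2⟩ := hy
      simp only [List.mem_cons, List.not_mem_nil, or_false] at hkr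
      rcases hkr with rfl | rfl | rfl | rfl | rfl | rfl | rfl | rfl | rfl | rfl | rfl | rfl <;>
        (split at hkr2 <;> simp_all)
    cases hm : List.filterMap f L with
    | nil => rw [hm] at h0; simp at h0
    | cons x xs =>
      rw [hm] at h0
      rw [hm] at hlb
      simp only [hm]
      rw [pv_best_eq x xs 2 h0 hlb]
      rfl
  -- case 4: nothing matched → matched = [] → best = 3
  · simp only [Bool.or_eq_true, not_or, Bool.not_eq_true] at h1 h2 h3
    obtain ⟨e1, e2, e3, e4⟩ := h1
    obtain ⟨e5, e6, e7, e8, e9, e10⟩ := h2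
    obtain ⟨e11, e12⟩ := h3
    have hm : List.filterMap f L = [] := by
      simp only [hL, hf, List.filterMap_cons, List.filterMap_nil]
      simp_all
    simp only [hm]
    rfl
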